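-- pv_equiv track=rewrite | github.com/tejaskannan/smart-tv-keyboard-leakage | smarttvleakage/utils/credit_card_detection.py | match_field_lengths
-- ===== SOURCE A (Python) =====
-- from typing import List, Optional, Tuple
--
-- def match_field_lengths(form_lengths: List[int], target_lengths: List[int]) -> Optional[int]:
--     if len(target_lengths) > len(form_lengths):
--         return None
--
--     target_size = len(target_lengths)
--
--     for start_idx in range(len(form_lengths) - target_size + 1):
--         form_split = form_lengths[start_idx:(start_idx + target_size)]
--
--         does_match = True
--         for form, target in zip(form_split, target_lengths):
--             if form != target:
--                 does_match = False
--                 break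
--
--         if does_match:
--             return start_idx
--
--     return None
-- ===== SOURCE B (Python) =====
-- from typing import List, Optional
--
--
-- def match_field_lengths(form_lengths: List[int], target_lengths: List[int]) -> Optional[int]:
--     n = len(form_lengths)
--     m = len(target_lengths)
--     if m > n:
--         return None
--
--     target_sum = sum(target_lengths)
--     window_sum = sum(form_lengths[:m])
--     for i in range(n - m + 1):
--         if window_sum == target_sum and form_lengths[i:i + m] == target_lengths:
--             return i
--         if i + m < n:
--             window_sum += form_lengths[i + m] - form_lengths[i]
--     return None
-- ===== Notes on version B (the rewrite author's own statement) =====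
-- stated objective: alternative
-- what changed: B is a Rabin-Karp style search: it maintains a rolling window sum as a fingerprint and only compares the window to the target when the sums agree, instead of A's element-by-element zip comparison at every start index.
import Mathlib
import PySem

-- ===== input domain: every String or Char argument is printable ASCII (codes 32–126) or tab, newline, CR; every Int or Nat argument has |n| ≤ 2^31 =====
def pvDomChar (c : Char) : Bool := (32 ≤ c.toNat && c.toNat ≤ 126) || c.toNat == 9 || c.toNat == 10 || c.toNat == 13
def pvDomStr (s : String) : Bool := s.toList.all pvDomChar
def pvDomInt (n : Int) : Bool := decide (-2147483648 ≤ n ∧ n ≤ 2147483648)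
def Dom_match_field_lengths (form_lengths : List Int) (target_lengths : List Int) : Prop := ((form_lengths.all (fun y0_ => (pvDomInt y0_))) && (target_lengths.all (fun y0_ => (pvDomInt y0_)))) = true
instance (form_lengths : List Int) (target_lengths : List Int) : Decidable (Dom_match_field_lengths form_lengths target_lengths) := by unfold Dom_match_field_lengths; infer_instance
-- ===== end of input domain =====

-- B replaces A's per-index zip comparison with a Rabin–Karp style scan: a rolling window sum is kept
-- as a fingerprint and the window is compared to the target only when the sums agree; same value proved.


-- ===== PORT A =====
-- inner 'for form, target in zip(...)' loop with the does_match flag and break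
def pvZipMatch : List (Int × Int) → Bool
  | [] => true
  | (f, t) :: rest => if f ≠ t then false else pvZipMatch rest

-- outer 'for start_idx in range(...)' loop with its early return
def pvALoop (form_lengths target_lengths : List Int) (target_size : Int) : List Int → Option Int
  | [] => none
  | start_idx :: rest =>
    let form_split := PySem.List.slice form_lengths (some start_idx) (some (start_idx + target_size))
    if pvZipMatch (form_split.zip target_lengths) then some start_idx
    else pvALoop form_lengths target_lengths target_size rest

def match_field_lengths (form_lengths : List Int) (target_lengths : List Int) : Option Int :=
  if (target_lengths.length : Int) > (form_lengths.length : Int) then none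
  else
    let target_size : Int := target_lengths.length
    pvALoop form_lengths target_lengths target_size
      (PySem.List.pyRange 0 ((form_lengths.length : Int) - target_size + 1) 1)

-- ===== PORT B =====
-- 'for i in range(n - m + 1)' carrying the rolling window_sum; the indexing form_lengths[i] /
-- form_lengths[i+m] is exact here because the guard i + m < n keeps both indices in range.
def pvBLoop (f t : List Int) (m n tsum : Int) : List Int → Int → Option Int
  | [], _ => none
  | i :: rest, wsum =>
    if wsum == tsum && (PySem.List.slice f (some i) (some (i + m)) == t) then some i
    else pvBLoop f t m n tsum rest
      (if i + m < n then wsum + PySem.List.pyGetD f (i + m) 0 - PySem.List.pyGetD f i 0 else wsum)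

def match_field_lengths_alt (form_lengths : List Int) (target_lengths : List Int) : Option Int :=
  let n : Int := form_lengths.length
  let m : Int := target_lengths.length
  if m > n then none
  else
    pvBLoop form_lengths target_lengths m n target_lengths.sum
      (PySem.List.pyRange 0 (n - m + 1) 1)
      (PySem.List.slice form_lengths none (some m)).sum

-- ===== PRECONDITION & SPEC =====
def Spec_match_field_lengths (form_lengths : List Int) (target_lengths : List Int) (out : Option Int) : Prop := out = match_field_lengths_alt form_lengths target_lengths
instance (form_lengths : List Int) (target_lengths : List Int) (out : Option Int) : Decidable (Spec_match_field_lengths form_lengths target_lengths out) := by unfold Spec_match_field_lengths; infer_instance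

-- ===== CLAIM =====
def Claim_equal_match_field_lengths : Prop := ∀ (form_lengths : List Int) (target_lengths : List Int), Dom_match_field_lengths form_lengths target_lengths → Spec_match_field_lengths form_lengths target_lengths (match_field_lengths form_lengths target_lengths)

-- ===== LEMMAS AND PROOFS =====

-- A's zip loop on equal-length lists is list equality.
theorem pvZipMatch_eq (xs ys : List Int) (h : xs.length = ys.length) :
    pvZipMatch (xs.zip ys) = (xs == ys) := by
  induction xs generalizing ys with
  | nil => cases ys with
    | nil => rfl
    | cons y ys => simp at h
  | cons x xs ih =>
    cases ys with
    | nil => simp at h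
    | cons y ys =>
      simp only [List.length_cons, Nat.add_right_cancel_iff] at h
      simp only [List.zip_cons_cons, pvZipMatch, ih ys h, List.cons_beq_cons]
      by_cases hxy : x = y <;> simp [hxy]

-- Inside the scanned range the window has exactly the target's length.
theorem pv_slice_len (f : List Int) (m i : Int) (h0 : 0 ≤ i) (hm : 0 ≤ m)
    (hub : i + m ≤ (f.length : Int)) :
    (PySem.List.slice f (some i) (some (i + m))).length = m.toNat := by
  rw [PySem.List.slice_toNat f h0 (by omega)]
  simp only [List.length_take, List.length_drop]
  omega

-- One slide of the window, Nat-indexed: the entering element comes in, the leaving one goes out.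
theorem pv_roll_nat (f : List Int) (a M : Nat) (h : a + M < f.length) :
    (List.take M (List.drop (a + 1) f)).sum
      = (List.take M (List.drop a f)).sum + f[a + M] - f[a] := by
  cases M with
  | zero => simp
  | succ M =>
    have hdrop : f.drop a = f[a] :: f.drop (a + 1) :=
      List.drop_eq_getElem_cons (by omega)
    have hM' : M < (f.drop (a + 1)).length := by
      simp only [List.length_drop]; omega
    have hget : (f.drop (a + 1))[M] = f[a + (M + 1)] := by
      rw [List.getElem_drop]; congr 1; omega
    rw [List.take_add_one, List.getElem?_eq_getElem hM', hget, hdrop, List.take_succ_cons]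
    simp only [List.sum_append, List.sum_cons, Option.toList_some, List.sum_nil]
    ring

-- Rolling-sum step: sliding the window one position right adds the entering and removes the leaving element.
theorem pv_roll (f : List Int) (m i : Int) (h0 : 0 ≤ i) (hm : 0 ≤ m)
    (hub : i + m < (f.length : Int)) :
    (PySem.List.slice f (some (i + 1)) (some (i + 1 + m))).sum
      = (PySem.List.slice f (some i) (some (i + m))).sum
        + PySem.List.pyGetD f (i + m) 0 - PySem.List.pyGetD f i 0 := by
  rw [PySem.List.slice_toNat f h0 (by omega), PySem.List.slice_toNat f (by omega) (by omega),
      PySem.List.pyGetD_eq_getElem f (i := i + m) 0 (by omega) hub,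
      PySem.List.pyGetD_eq_getElem f (i := i) 0 h0 (by omega)]
  simp only [show (i + 1).toNat = i.toNat + 1 from by omega,
    show (i + m).toNat = i.toNat + m.toNat from by omega,
    show (i + 1 + m).toNat - (i.toNat + 1) = m.toNat from by omega,
    show i.toNat + m.toNat - i.toNat = m.toNat from by omega]
  exact pv_roll_nat f i.toNat m.toNat (by omega)

-- B's per-index test equals A's: the sum check is implied by window equality, so it never changes the answer.
theorem pv_cond_eq (f t : List Int) (i : Int) (tsum wsum : Int)
    (hw : wsum = (PySem.List.slice f (some i) (some (i + (t.length : Int)))).sum)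
    (ht : tsum = t.sum) :
    (wsum == tsum && (PySem.List.slice f (some i) (some (i + (t.length : Int))) == t))
      = (PySem.List.slice f (some i) (some (i + (t.length : Int))) == t) := by
  by_cases h : PySem.List.slice f (some i) (some (i + (t.length : Int))) = t
  · simp [h, hw, ht]
  · simp [h]

-- The two scans agree on the tail of the range whenever the carried sum is the current window's sum.
theorem pv_loops_eq (f t : List Int) : ∀ (k : Nat) (i wsum : Int),
    0 ≤ i → i + (t.length : Int) ≤ (f.length : Int) →
    k = ((f.length : Int) - t.length + 1 - i).toNat →
    wsum = (PySem.List.slice f (some i) (some (i + (t.length : Int)))).sum →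
    pvBLoop f t t.length f.length t.sum
        (PySem.List.pyRange i ((f.length : Int) - t.length + 1) 1) wsum
      = pvALoop f t t.length
        (PySem.List.pyRange i ((f.length : Int) - t.length + 1) 1) := by
  intro k
  induction k with
  | zero => intro i wsum h0 hub hk _; omega
  | succ k ih =>
    intro i wsum h0 hub hk hw
    rw [PySem.List.pyRange_one_cons (by omega)]
    simp only [pvBLoop, pvALoop]
    rw [pvZipMatch_eq _ _ (by
      rw [pv_slice_len f (t.length : Int) i h0 (by omega) hub]; omega)]
    rw [pv_cond_eq f t i t.sum wsum hw rfl]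
    by_cases hmatch : PySem.List.slice f (some i) (some (i + (t.length : Int))) = t
    · simp [hmatch]
    · have hc : (PySem.List.slice f (some i) (some (i + (t.length : Int))) == t) = false := by
        simp [hmatch]
      rw [hc]
      simp only [Bool.false_eq_true, if_false]
      by_cases hlast : i + 1 + (t.length : Int) ≤ (f.length : Int)
      · rw [if_pos (by omega : i + (t.length : Int) < (f.length : Int))]
        exact ih (i + 1) _ (by omega) hlast (by omega)
          (by rw [pv_roll f (t.length : Int) i h0 (by omega) (by omega), hw])
      · rw [PySem.List.pyRange_one_eq_nil (by omega)]
        simp [pvBLoop, pvALoop]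

theorem match_field_lengths_eq (f t : List Int) :
    match_field_lengths f t = match_field_lengths_alt f t := by
  unfold match_field_lengths match_field_lengths_alt
  by_cases hg : (t.length : Int) > (f.length : Int)
  · simp [hg]
  · simp only [hg, if_false]
    rw [pv_loops_eq f t ((f.length : Int) - t.length + 1).toNat 0
      (PySem.List.slice f none (some (t.length : Int))).sum le_rfl (by omega) (by omega)]
    rw [PySem.List.slice_to f (by omega), PySem.List.slice_toNat f le_rfl (by omega)]
    simp

-- ===== VERDICT =====
theorem match_field_lengths_spec : Claim_equal_match_field_lengths := by
  intro f t _
  unfold Spec_match_field_lengths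
  exact match_field_lengths_eq f t
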